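-- pv_equiv track=rewrite | github.com/dalnoboy75/drone_trajectory_planning | Alg_Little/Alg_L_Classes.py | vertex
-- ===== SOURCE A (Python) =====
-- def vertex(edges: list[tuple], list_airfields: list) -> list[list]:
--     """
--         Возвращает массив вершин, через которые проходит гамильтонов путь.
--
--         Args:
--             edges (list[tuple]): Список ребер.
--             list_airfields (list): Список аэродромов.
--
--         Returns:
--             list[list]: Массив вершин.
--     """
--     vertices = [edge[0] for edge in edges]
--     result = []
--     cur_res = []
--     for i in vertices:
--         cur_res.append(i)
--         if i in list_airfields:
--             result.append(cur_res)
--             cur_res = []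
--     if len(cur_res) != 0:
--         result.append(cur_res)
--     return result
-- ===== SOURCE B (Python) =====
-- def vertex(edges: list[tuple], list_airfields: list) -> list[list]:
--     # Build the segments back-to-front: walk the vertices in reverse, starting a
--     # new segment at each airfield vertex and otherwise prepending to the first one.
--     res = []
--     for v in reversed([edge[0] for edge in edges]):
--         if v in list_airfields:
--             res = [[v]] + res
--         elif not res:
--             res = [[v]]
--         else:
--             res[0] = [v] + res[0]
--     return res
-- ===== Notes on version B (the rewrite author's own statement) =====
-- stated objective: alternative
-- what changed: Replaces the forward accumulator loop (collect into cur_res, flush on airfield, append leftover) by a backwards single pass that builds the segment list back-to-front: each airfield starts a new head segment, other vertices are prepended to the current head segment.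
import Mathlib
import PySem

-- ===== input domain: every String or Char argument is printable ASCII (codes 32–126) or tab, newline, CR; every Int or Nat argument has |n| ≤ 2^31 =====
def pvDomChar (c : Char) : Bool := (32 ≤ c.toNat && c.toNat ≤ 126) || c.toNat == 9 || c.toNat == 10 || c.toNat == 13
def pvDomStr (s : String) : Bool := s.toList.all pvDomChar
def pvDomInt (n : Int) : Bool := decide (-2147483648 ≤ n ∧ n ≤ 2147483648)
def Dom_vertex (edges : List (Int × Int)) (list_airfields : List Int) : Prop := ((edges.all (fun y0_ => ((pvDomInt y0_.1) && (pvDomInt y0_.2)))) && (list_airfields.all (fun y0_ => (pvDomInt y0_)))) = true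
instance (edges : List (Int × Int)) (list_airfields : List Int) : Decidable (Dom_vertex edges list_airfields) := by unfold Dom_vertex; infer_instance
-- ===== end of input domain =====

-- B builds the segment list back-to-front in one reverse pass instead of A's forward
-- accumulator-and-flush loop; objective: alternative decomposition, same cost.


-- ===== PORT A =====
-- A: forward loop, accumulate cur_res, flush on airfield, append leftover at the end
def vertexLoopA (list_airfields : List Int) : List Int → (List (List Int) × List Int) → (List (List Int) × List Int)
  | [], st => st
  | i :: rest, (result, cur_res) =>
      let cur_res' := cur_res ++ [i]
      if list_airfields.contains i then
        vertexLoopA list_airfields rest (result ++ [cur_res'], [])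
      else
        vertexLoopA list_airfields rest (result, cur_res')

def vertex (edges : List (Int × Int)) (list_airfields : List Int) : List (List Int) :=
  let vertices := edges.map (fun e => e.1)
  let st := vertexLoopA list_airfields vertices ([], [])
  if st.2.length ≠ 0 then st.1 ++ [st.2] else st.1

-- ===== PORT B =====
-- B: reverse pass building the result back-to-front (foldr over the vertices)
def vertexStepB (list_airfields : List Int) (v : Int) (res : List (List Int)) : List (List Int) :=
  if list_airfields.contains v then [v] :: res
  else match res with
    | [] => [[v]]
    | s :: rest => (v :: s) :: rest

def vertex_alt (edges : List (Int × Int)) (list_airfields : List Int) : List (List Int) :=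
  (edges.map (fun e => e.1)).foldr (vertexStepB list_airfields) []

-- ===== PRECONDITION & SPEC =====
def Spec_vertex (edges : List (Int × Int)) (list_airfields : List Int) (out : List (List Int)) : Prop := out = vertex_alt edges list_airfields
instance (edges : List (Int × Int)) (list_airfields : List Int) (out : List (List Int)) : Decidable (Spec_vertex edges list_airfields out) := by unfold Spec_vertex; infer_instance

-- ===== CLAIM (what is proved, stated in full; the proofs are below) =====
def Claim_equal_vertex : Prop := ∀ (edges : List (Int × Int)) (list_airfields : List Int), Dom_vertex edges list_airfields → Spec_vertex edges list_airfields (vertex edges list_airfields)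

-- ===== LEMMAS AND PROOFS =====
-- finishing A's state / splicing a pending prefix into B's head segment
def vFinish (st : List (List Int) × List Int) : List (List Int) :=
  if st.2.length ≠ 0 then st.1 ++ [st.2] else st.1

def vPrep (cur : List Int) (r : List (List Int)) : List (List Int) :=
  if cur = [] then r
  else match r with
    | [] => [cur]
    | s :: rest => (cur ++ s) :: rest

theorem vertex_key (la : List Int) (xs : List Int) :
    ∀ (res : List (List Int)) (cur : List Int),
      vFinish (vertexLoopA la xs (res, cur)) = res ++ vPrep cur (xs.foldr (vertexStepB la) []) := by
  induction xs with
  | nil =>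
      intro res cur
      simp only [vertexLoopA, vFinish, vPrep, List.foldr]
      by_cases h : cur = [] <;> simp [h]
  | cons x xs ih =>
      intro res cur
      simp only [vertexLoopA, List.foldr]
      by_cases hx : la.contains x
      · simp only [hx, if_pos, ih]
        simp only [vertexStepB, hx, if_pos, List.append_assoc]
        congr 1
        by_cases h : cur = [] <;> simp [vPrep, h]
      · simp only [hx, Bool.false_eq_true, if_false, ih]
        simp only [vertexStepB, hx, Bool.false_eq_true, if_false]
        congr 1
        by_cases h : cur = []
        · simp [vPrep, h]
        · cases xs.foldr (vertexStepB la) [] <;>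
            simp [vPrep, h]

-- ===== VERDICT (by name: the statement is the Claim_ definition above) =====
theorem vertex_spec : Claim_equal_vertex := by
  intro edges la _
  show vertex edges la = vertex_alt edges la
  unfold vertex vertex_alt
  have := vertex_key la (edges.map (fun e => e.1)) [] []
  simpa [vFinish, vPrep] using this
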